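-- pv_equiv track=rewrite | github.com/thierryxdp/TCC | problems/822/solution_128301.py | repetidos
-- ===== SOURCE A (Python) =====
-- def repetidos(N):
--     repete = 0
--     r = 0
--     for numeros in N:
--         if numeros == N[r-1]:
--             repete = repete + 1
--             r = r + 1
--         else:
--             r = r + 1
--     return repete
-- ===== SOURCE B (Python) =====
-- def repetidos(N):
--     # Run-length encode N, then: answer = len(N) - number of circular run boundaries.
--     runs = []
--     for x in N:
--         if runs and runs[-1][0] == x:
--             runs[-1][1] += 1
--         else:
--             runs.append([x, 1])
--     if not runs:
--         return 0
--     b = len(runs) - 1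
--     if runs[0][0] != runs[-1][0]:
--         b += 1
--     return len(N) - b
-- ===== Notes on version B (the rewrite author's own statement) =====
-- stated objective: alternative
-- what changed: B run-length-encodes the list and returns len(N) minus the number of circular run boundaries (runs-1, plus one if the first and last run keys differ), instead of A's element-by-element comparison with N[r-1] using negative-index wraparound.
import Mathlib
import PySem

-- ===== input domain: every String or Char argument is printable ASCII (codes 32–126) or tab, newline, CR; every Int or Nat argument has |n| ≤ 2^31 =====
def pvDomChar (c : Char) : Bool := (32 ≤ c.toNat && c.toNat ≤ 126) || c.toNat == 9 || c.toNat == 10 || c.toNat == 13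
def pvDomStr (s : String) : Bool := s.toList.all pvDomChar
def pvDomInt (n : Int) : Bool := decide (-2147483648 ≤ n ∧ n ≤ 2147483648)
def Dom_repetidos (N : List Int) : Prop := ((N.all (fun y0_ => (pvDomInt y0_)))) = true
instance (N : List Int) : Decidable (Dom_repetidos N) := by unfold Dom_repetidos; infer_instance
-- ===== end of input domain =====

-- B run-length-encodes N and returns len(N) minus the circular boundary count, instead of A's per-element probe of N[r-1]; objective: alternative algorithm, same cost.

-- ===== PORT A =====
-- one loop iteration: compare the element with N[r-1] (negative-index wraparound), bump r
def repStep (N : List Int) (st : Int × Int) (numeros : Int) : Int × Int :=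
  if PySem.List.pyGet? N (st.2 - 1) = some numeros then (st.1 + 1, st.2 + 1)
  else (st.1, st.2 + 1)

def repetidos (N : List Int) : Int :=
  (N.foldl (repStep N) (0, 0)).1

-- ===== PORT B =====
-- run-length encoding step; the accumulator holds the runs in REVERSED order, so the
-- Python code's 'runs[-1]' (most recent run) is the head and 'runs.append' is a cons
def rleStep (runs : List (Int × Int)) (x : Int) : List (Int × Int) :=
  match runs with
  | (k, c) :: rest => if k == x then (k, c + 1) :: rest else (x, 1) :: (k, c) :: rest
  | [] => [(x, 1)]

-- key of the OLDEST run (Python's runs[0][0]): last element of the reversed runs list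
def firstKey (runs : List (Int × Int)) : Option Int := runs.getLast?.map Prod.fst

def repetidos_alt (N : List Int) : Int :=
  let runs := N.foldl rleStep []
  match runs with
  | [] => 0
  | (k, _) :: _ =>
      -- b = len(runs) - 1, plus 1 if runs[0][0] != runs[-1][0]
      let b : Int := (runs.length : Int) - 1 + (if firstKey runs ≠ some k then 1 else 0)
      (N.length : Int) - b

-- ===== PRECONDITION & SPEC =====
def Spec_repetidos (N : List Int) (out : Int) : Prop := out = repetidos_alt N
instance (N : List Int) (out : Int) : Decidable (Spec_repetidos N out) := by unfold Spec_repetidos; infer_instance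

-- ===== CLAIM (what is proved, stated in full; the proofs are below) =====
def Claim_equal_repetidos : Prop := ∀ (N : List Int), Dom_repetidos N → Spec_repetidos N (repetidos N)

-- ===== LEMMAS AND PROOFS =====

-- number of adjacent equal pairs (no wraparound)
def adjM : List Int → Nat
  | a :: b :: t => (if a = b then 1 else 0) + adjM (b :: t)
  | _ => 0

-- B's rotated list (used to characterise A's loop)
def pvRot (N : List Int) : List Int :=
  PySem.List.slice N (some (-1)) none ++ PySem.List.slice N none (some (-1))

theorem pvRot_eq (N : List Int) : pvRot N = N.drop (N.length - 1) ++ N.dropLast := by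
  simp [pvRot, PySem.List.slice_from_neg_one, PySem.List.slice_to_neg_one]

theorem pvRot_concat (ys : List Int) (y : Int) : pvRot (ys ++ [y]) = y :: ys := by
  simp [pvRot_eq]

theorem pvRot_cons (N : List Int) (hN : N ≠ []) :
    pvRot N = N.getLast hN :: N.dropLast := by
  rcases N.eq_nil_or_concat with rfl | ⟨ys, y, rfl⟩
  · exact absurd rfl hN
  · have h1 : pvRot (ys.concat y) = y :: ys := by
      rw [List.concat_eq_append]; exact pvRot_concat ys y
    rw [h1]
    simp [List.concat_eq_append]

theorem pvRot_length (N : List Int) : (pvRot N).length = N.length := by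
  rcases N.eq_nil_or_concat with rfl | ⟨ys, y, rfl⟩
  · simp [pvRot_eq]
  · rw [List.concat_eq_append, pvRot_concat]
    simp

theorem pvRot_get? (N : List Int) (k : Nat) (hk : k < N.length) :
    PySem.List.pyGet? N ((k : Int) - 1) = (pvRot N)[k]? := by
  rcases N.eq_nil_or_concat with rfl | ⟨ys, y, rfl⟩
  · simp at hk
  · rw [List.concat_eq_append] at hk ⊢
    rw [pvRot_concat]
    rcases k with _ | j
    · simp [PySem.List.pyGet?_neg_one]
    · have h1 : ((j + 1 : Nat) : Int) - 1 = ((j : Nat) : Int) := by push_cast; ring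
      rw [h1, PySem.List.pyGet?_natCast]
      simp only [List.length_append, List.length_singleton] at hk
      have hj : j < ys.length := by omega
      simp [List.getElem?_append_left hj, List.getElem?_eq_getElem hj]

theorem foldl_repStep (N : List Int) :
    ∀ (L : List Int) (c : Int) (k : Nat), N.drop k = L →
      (L.foldl (repStep N) (c, (k : Int))).1
        = c + ((L.zip ((pvRot N).drop k)).countP (fun p => p.1 == p.2) : Int) := by
  intro L
  induction L with
  | nil => intro c k _; simp
  | cons x L' ih =>
    intro c k hdrop
    have hk : k < N.length := by
      by_contra h
      rw [List.drop_eq_nil_of_le (by omega)] at hdrop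
      exact (List.cons_ne_nil x L') hdrop.symm
    have hdrop' : N.drop (k + 1) = L' := by
      rw [← List.tail_drop, hdrop, List.tail_cons]
    have hkR : k < (pvRot N).length := by rwa [pvRot_length]
    have hR : (pvRot N).drop k = (pvRot N)[k] :: (pvRot N).drop (k + 1) :=
      List.drop_eq_getElem_cons hkR
    have hget : PySem.List.pyGet? N ((k : Int) - 1) = some ((pvRot N)[k]) := by
      rw [pvRot_get? N k hk, List.getElem?_eq_getElem hkR]
    have hcast : ((k : Int) + 1) = ((k + 1 : Nat) : Int) := by push_cast; ring
    have hstep : repStep N (c, (k : Int)) x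
        = ((if x == (pvRot N)[k] then c + 1 else c), ((k + 1 : Nat) : Int)) := by
      by_cases h : x = (pvRot N)[k] <;>
        simp only [repStep, hget, Option.some.injEq, hcast, beq_iff_eq] <;>
        simp [h, eq_comm]
    rw [List.foldl_cons, hstep, ih _ (k + 1) hdrop', hR]
    simp only [List.zip_cons_cons, List.countP_cons]
    by_cases h : x = (pvRot N)[k] <;> simp [h] <;> push_cast <;> ring

-- A's circular count = (first element equal to last?) + adjacent matches
theorem countP_zip_dropLast (a : Int) (t : List Int) :
    ((t.zip ((a :: t).dropLast)).countP (fun p => p.1 == p.2)) = adjM (a :: t) := by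
  induction t generalizing a with
  | nil => simp [adjM]
  | cons b t' ih =>
    have : (a :: b :: t').dropLast = a :: (b :: t').dropLast := by
      simp [List.dropLast_cons_of_ne_nil]
    rw [this]
    simp only [List.zip_cons_cons, List.countP_cons, adjM, ih b]
    by_cases h : a = b
    · simp [h]; omega
    · have hba : ¬ (b = a) := fun hh => h hh.symm
      simp [h, hba]

theorem A_char (a : Int) (t : List Int) :
    repetidos (a :: t)
      = (if a = (a :: t).getLast (by simp) then 1 else 0) + (adjM (a :: t) : Int) := by
  have hz := foldl_repStep (a :: t) (a :: t) 0 0 (by simp)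
  have hrot := pvRot_cons (a :: t) (by simp)
  simp only [Nat.cast_zero] at hz
  rw [repetidos, hz, hrot]
  simp only [List.drop_zero, List.zip_cons_cons, List.countP_cons, countP_zip_dropLast]
  simp only [beq_iff_eq]
  by_cases h : a = (a :: t).getLast (by simp)
  · rw [if_pos h, if_pos h]
    push_cast
    ring
  · rw [if_neg h, if_neg h]
    push_cast
    ring

theorem adjM_concat (p : List Int) (hp : p ≠ []) (x : Int) :
    adjM (p ++ [x]) = adjM p + (if p.getLast hp = x then 1 else 0) := by
  induction p with
  | nil => exact absurd rfl hp
  | cons a t iht =>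
    rcases eq_or_ne t [] with rfl | htne
    · simp [adjM]
    · obtain ⟨b, t', rfl⟩ := List.exists_cons_of_ne_nil htne
      have h2 := iht htne
      rw [List.cons_append] at h2
      simp only [List.cons_append, adjM]
      rw [h2, List.getLast_cons htne]
      omega

-- invariant of B's run-length-encoding fold
theorem rle_inv (p : List Int) (hp : p ≠ []) :
    ∃ k c rest, p.foldl rleStep [] = (k, c) :: rest ∧
      k = p.getLast hp ∧
      firstKey ((k, c) :: rest) = some (p.head hp) ∧
      ((k, c) :: rest).length + adjM p = p.length := by
  induction p using List.reverseRecOn with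
  | nil => exact absurd rfl hp
  | append_singleton p x ih =>
    rcases eq_or_ne p [] with rfl | hpne
    · refine ⟨x, 1, [], rfl, by simp, rfl, ?_⟩
      simp [adjM]
    · obtain ⟨k, c, rest, hfold, hk, hfk, hlen⟩ := ih hpne
      have hfold' : (p ++ [x]).foldl rleStep [] = rleStep ((k, c) :: rest) x := by
        rw [List.foldl_append, hfold]; rfl
      have hadj := adjM_concat p hpne x
      have hhead : (p ++ [x]).head (by simp) = p.head hpne := by
        obtain ⟨a, t, rfl⟩ := List.exists_cons_of_ne_nil hpne
        simp
      have hlast : (p ++ [x]).getLast (by simp) = x := by simp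
      by_cases hkx : k = x
      · refine ⟨k, c + 1, rest, ?_, ?_, ?_, ?_⟩
        · rw [hfold']; simp [rleStep, hkx]
        · rw [hlast, hkx]
        · rw [hhead, ← hfk]
          cases rest <;> simp [firstKey]
        · rw [hadj, if_pos (by rw [← hk]; exact hkx)]
          simp only [List.length_cons, List.length_append, List.length_nil] at hlen ⊢
          omega
      · refine ⟨x, 1, (k, c) :: rest, ?_, ?_, ?_, ?_⟩
        · rw [hfold']; simp [rleStep, hkx]
        · rw [hlast]
        · rw [hhead, ← hfk]; simp [firstKey]
        · rw [hadj, if_neg (by rw [← hk]; exact hkx)]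
          simp only [List.length_cons, List.length_append, List.length_nil] at hlen ⊢
          omega

-- first run's key equals the first element, so the boundary test is head-vs-last
theorem B_char (a : Int) (t : List Int) :
    repetidos_alt (a :: t)
      = (if a = (a :: t).getLast (by simp) then 1 else 0) + (adjM (a :: t) : Int) := by
  obtain ⟨k, c, rest, hfold, hk, hfk, hlen⟩ := rle_inv (a :: t) (by simp)
  have hfk' : firstKey ((k, c) :: rest) = some a := hfk
  have hBv : repetidos_alt (a :: t)
      = ((a :: t).length : Int)
        - ((((k, c) :: rest).length : Int) - 1
           + (if firstKey ((k, c) :: rest) ≠ some k then 1 else 0)) := by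
    unfold repetidos_alt
    rw [hfold]
  have hcond : (firstKey ((k, c) :: rest) ≠ some k) ↔ (a ≠ (a :: t).getLast (by simp)) := by
    rw [hfk', ← hk]
    simp
  have hL : (((k, c) :: rest).length : Int) + (adjM (a :: t) : Int) = ((a :: t).length : Int) := by
    exact_mod_cast hlen
  rw [hBv]
  by_cases h : a = (a :: t).getLast (by simp)
  · rw [if_neg (fun hc => (hcond.mp hc) h), if_pos h]
    omega
  · rw [if_pos (hcond.mpr h), if_neg h]
    omega

-- ===== VERDICT (by name: the statement is the Claim_ definition above) =====
theorem repetidos_spec : Claim_equal_repetidos := by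
  intro N _
  unfold Spec_repetidos
  cases N with
  | nil => rfl
  | cons a t => rw [A_char, B_char]
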